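-- pv_equiv track=rewrite | github.com/kevinguo344/JSEndEffector | gh_binary_convert.py | createCommands
-- ===== SOURCE A (Python) =====
-- BITS = 16
--
-- DELIMITER = -1
--
-- OFF = 0
--
-- def createCommands(stps,pulse):
--     chunk_number = 0
--     final_outputs = []
--
--     cmd_list_steps,num_chunks_steps = interpretChunks(stps)
--     cmd_list_delimeter = interpret(DELIMITER)
--     cmd_list_pulse = interpret(pulse)
--     cmd_list_off = interpret(OFF)\
--
--     for i in range(num_chunks_steps):
--         # adds step commands to outputs
--         final_outputs.extend(cmd_list_steps[16*i:16*(i+1)])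
--         # adds delimeter commands to outputs
--         final_outputs.extend(cmd_list_delimeter)
--         # adds pulse width commands to outputs
--         final_outputs.extend(cmd_list_pulse)
--         final_outputs.extend(cmd_list_off)
--         chunk_number += 4
--
--     return final_outputs,chunk_number
--
-- def interpretChunks(number):
--     # sets up default values of variables
--     chunk_amount = 1
--     chunks = []
--
--     # splits the number into chunks
--     if number > 32767:
--         chunk_amount = int(number / 32767)
--         for i in range(chunk_amount):
--             chunks.append(32767)
--         if number % 32767 > 0:
--             chunks.append(number % 32767)
--             chunk_amount += 1
--     elif number < -32768:
--         chunk_amount = int(number / -32768)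
--         for i in range(chunk_amount):
--             chunks.append(-32768)
--         if number % -32768 < 0:
--             chunks.append(number % -32768)
--             chunk_amount += 1
--     else:
--         chunks.append(number)
--
--     output = []
--
--     for i in range(chunk_amount):
--         output.extend(interpret(chunks[i]))
--
--     return output,chunk_amount
--
-- def interpret(num):
--     out = [None] * BITS
--     is_negative = False
--
--     if num < 0:
--         is_negative = True
--         num = abs(num)
--
--     binary = bin(num)[2:].zfill(BITS-1)
--
--     for i in range(BITS-2,-1,-1):
--         if int(binary[i]) == 1:
--             out[BITS-2-i] = True
--         else:
--             out[BITS-2-i] = False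
--     if is_negative:
--         out[BITS-1] = False
--     else:
--         out[BITS-1] = True
--     return out
-- ===== SOURCE B (Python) =====
-- BITS = 16
-- DELIMITER = -1
-- OFF = 0
--
-- def _interpret(num):
--     # 15 magnitude bits (top 15 chars of the zero-filled binary string, low char first) + sign bit
--     s = bin(abs(num))[2:].zfill(BITS - 1)
--     return [c == '1' for c in s[BITS - 2::-1]] + [num >= 0]
--
-- def createCommands(stps, pulse):
--     # Greedy repeated subtraction: peel saturated chunks off stps one at a time and
--     # emit each 4-command block (chunk, delimiter, pulse, off) immediately.
--     tail = _interpret(DELIMITER) + _interpret(pulse) + _interpret(OFF)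
--     out = []
--     count = 0
--     n = stps
--     while n > 32767:
--         out += _interpret(32767) + tail
--         count += 4
--         n -= 32767
--     while n < -32768:
--         out += _interpret(-32768) + tail
--         count += 4
--         n += 32768
--     out += _interpret(n) + tail
--     return out, count + 4
-- ===== Notes on version B (the rewrite author's own statement) =====
-- stated objective: alternative
-- what changed: B replaces A's division-based chunk counting and staged list building (interpretChunks' flat 16*n bit list, then re-slicing it 16-wide) by a greedy repeated-subtraction loop that peels one saturated chunk (32767 or -32768) off stps at a time and emits its full 4-command block immediately, with the final residue emitted unconditionally; no division, no chunk list, no slicing; interpret is a comprehension over the reversed zero-filled binary string.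
import Mathlib
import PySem

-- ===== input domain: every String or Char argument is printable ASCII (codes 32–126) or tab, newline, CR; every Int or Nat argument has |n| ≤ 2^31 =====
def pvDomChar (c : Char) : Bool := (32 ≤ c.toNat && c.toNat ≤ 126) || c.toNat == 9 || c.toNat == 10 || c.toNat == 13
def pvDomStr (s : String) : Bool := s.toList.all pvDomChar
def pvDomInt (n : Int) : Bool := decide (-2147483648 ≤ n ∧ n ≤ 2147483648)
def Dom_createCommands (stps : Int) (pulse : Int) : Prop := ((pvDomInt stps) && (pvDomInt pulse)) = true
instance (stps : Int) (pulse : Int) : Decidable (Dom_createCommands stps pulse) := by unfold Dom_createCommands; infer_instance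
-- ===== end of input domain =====

-- B replaces division-based chunk counting and the flat-bit-list/re-slice staging by a greedy
-- repeated-subtraction loop that emits each 4-command block directly (objective: alternative);
-- same return value as A on the whole domain.

-- ===== PORT A =====

-- interpret(num): fill out[0..14] from the zero-filled binary string, out[15] = sign.
-- bin(num)[2:] for num ≥ 0 is PySem.Int.toBinChars; binary[i] is in range for all i used
-- (the string has ≥ 15 chars after zfill), int(binary[i]) == 1 iff binary[i] == '1'.
def interpretA (num : Int) : List Bool :=
  let is_negative := decide (num < 0)
  let n : Int := |num|
  let binary : List Char := PySem.Chars.zfill (PySem.Int.toBinChars n) 15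
  let out := (PySem.List.pyRange 14 (-1) (-1)).foldl
    (fun out i =>
      if PySem.List.pyGetD binary i ' ' == '1'
      then PySem.List.pySetD out (16 - 2 - i) true
      else PySem.List.pySetD out (16 - 2 - i) false)
    (List.replicate 16 false)  -- [None]*16: every cell is overwritten before the list is returned
  if is_negative then PySem.List.pySetD out 15 false else PySem.List.pySetD out 15 true

-- int(number / 32767) / int(number / -32768): float truncation; exact floor division on |number| ≤ 2^31
-- (checked against CPython), ported as PySem.Int.floordiv.
def interpretChunksA (number : Int) : List Bool × Int :=
  let chunk_amount : Int := 1
  let chunks : List Int := []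
  let (chunks, chunk_amount) :=
    if number > 32767 then
      let chunk_amount := PySem.Int.floordiv number 32767
      let chunks := (PySem.List.pyRange 0 chunk_amount 1).foldl (fun ch _ => ch ++ [(32767 : Int)]) chunks
      if PySem.Int.mod number 32767 > 0 then
        (chunks ++ [PySem.Int.mod number 32767], chunk_amount + 1)
      else (chunks, chunk_amount)
    else if number < -32768 then
      let chunk_amount := PySem.Int.floordiv number (-32768)
      let chunks := (PySem.List.pyRange 0 chunk_amount 1).foldl (fun ch _ => ch ++ [(-32768 : Int)]) chunks
      if PySem.Int.mod number (-32768) < 0 then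
        (chunks ++ [PySem.Int.mod number (-32768)], chunk_amount + 1)
      else (chunks, chunk_amount)
    else (chunks ++ [number], chunk_amount)
  let output := (PySem.List.pyRange 0 chunk_amount 1).foldl
    (fun out i => out ++ interpretA (PySem.List.pyGetD chunks i 0)) []
  (output, chunk_amount)

def createCommands (stps : Int) (pulse : Int) : List Bool × Int :=
  let chunk_number : Int := 0
  let final_outputs : List Bool := []
  let p := interpretChunksA stps
  let cmd_list_steps := p.1
  let num_chunks_steps := p.2
  let cmd_list_delimeter := interpretA (-1)
  let cmd_list_pulse := interpretA pulse
  let cmd_list_off := interpretA 0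
  let st := (PySem.List.pyRange 0 num_chunks_steps 1).foldl
    (fun (st : List Bool × Int) i =>
      (st.1 ++ PySem.List.slice cmd_list_steps (some (16 * i)) (some (16 * (i + 1)))
            ++ cmd_list_delimeter ++ cmd_list_pulse ++ cmd_list_off,
       st.2 + 4))
    (final_outputs, chunk_number)
  (st.1, st.2)

-- ===== PORT B =====

-- 15 magnitude bits (first 15 chars of the zero-filled binary string, low char first) + sign bit;
-- s[14::-1] is the first 15 chars reversed.
def interpretAlt (num : Int) : List Bool :=
  let s : List Char := PySem.Chars.zfill (PySem.Int.toBinChars |num|) 15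
  ((s.take 15).reverse.map (fun c => c == '1')) ++ [decide (0 ≤ num)]

-- while n > 32767: emit block for 32767, n -= 32767
def goPos (tail : List Bool) (n : Int) (out : List Bool) (count : Int) : Int × List Bool × Int :=
  if h : n > 32767 then
    goPos tail (n - 32767) (out ++ (interpretAlt 32767 ++ tail)) (count + 4)
  else (n, out, count)
termination_by n.toNat
decreasing_by omega

-- while n < -32768: emit block for -32768, n += 32768
def goNeg (tail : List Bool) (n : Int) (out : List Bool) (count : Int) : Int × List Bool × Int :=
  if h : n < -32768 then
    goNeg tail (n + 32768) (out ++ (interpretAlt (-32768) ++ tail)) (count + 4)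
  else (n, out, count)
termination_by (-n).toNat
decreasing_by omega

def createCommands_alt (stps : Int) (pulse : Int) : List Bool × Int :=
  let tail := interpretAlt (-1) ++ interpretAlt pulse ++ interpretAlt 0
  let r1 := goPos tail stps [] 0
  let r2 := goNeg tail r1.1 r1.2.1 r1.2.2
  (r2.2.1 ++ (interpretAlt r2.1 ++ tail), r2.2.2 + 4)

-- ===== PRECONDITION & SPEC =====
def Spec_createCommands (stps : Int) (pulse : Int) (out : List Bool × Int) : Prop := out = createCommands_alt stps pulse
instance (stps : Int) (pulse : Int) (out : List Bool × Int) : Decidable (Spec_createCommands stps pulse out) := by unfold Spec_createCommands; infer_instance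

-- ===== CLAIM (what is proved, stated in full; the proofs are below) =====
def Claim_equal_createCommands : Prop := ∀ (stps : Int) (pulse : Int), Dom_createCommands stps pulse → Spec_createCommands stps pulse (createCommands stps pulse)


-- ===== LEMMAS AND PROOFS =====

-- the chunk-value list both programs realize (proof-side characterization only)
def chunkValues (stps : Int) : List Int :=
  if stps > 32767 then
    List.replicate (PySem.Int.floordiv stps 32767).toNat (32767 : Int)
      ++ (if PySem.Int.mod stps 32767 > 0 then [PySem.Int.mod stps 32767] else [])
  else if stps < -32768 then
    List.replicate (PySem.Int.floordiv stps (-32768)).toNat (-32768 : Int)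
      ++ (if PySem.Int.mod stps (-32768) < 0 then [PySem.Int.mod stps (-32768)] else [])
  else [stps]

-- the write loop of interpretA, fully unrolled
lemma fold_explicit (g : Int → Bool) (sgn : Bool) :
    PySem.List.pySetD
      ((PySem.List.pyRange 14 (-1) (-1)).foldl
        (fun out i => PySem.List.pySetD out (16 - 2 - i) (g i))
        (List.replicate 16 false)) 15 sgn
    = [g 14, g 13, g 12, g 11, g 10, g 9, g 8, g 7, g 6, g 5, g 4, g 3, g 2, g 1, g 0, sgn] := by
  have hr : PySem.List.pyRange 14 (-1) (-1) = [14,13,12,11,10,9,8,7,6,5,4,3,2,1,0] := by decide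
  rw [hr]
  simp [PySem.List.pySetD, PySem.List.pySet?, PySem.List.pyIdx?, List.replicate]

-- interpretAlt's comprehension, fully unrolled
lemma take_rev_map (s : List Char) (hs : 15 ≤ s.length) (sgn : Bool) :
    ((s.take 15).reverse.map (fun c => c == '1')) ++ [sgn]
    = [PySem.List.pyGetD s 14 ' ' == '1', PySem.List.pyGetD s 13 ' ' == '1', PySem.List.pyGetD s 12 ' ' == '1',
       PySem.List.pyGetD s 11 ' ' == '1', PySem.List.pyGetD s 10 ' ' == '1', PySem.List.pyGetD s 9 ' ' == '1',
       PySem.List.pyGetD s 8 ' ' == '1', PySem.List.pyGetD s 7 ' ' == '1', PySem.List.pyGetD s 6 ' ' == '1',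
       PySem.List.pyGetD s 5 ' ' == '1', PySem.List.pyGetD s 4 ' ' == '1', PySem.List.pyGetD s 3 ' ' == '1',
       PySem.List.pyGetD s 2 ' ' == '1', PySem.List.pyGetD s 1 ' ' == '1', PySem.List.pyGetD s 0 ' ' == '1', sgn] := by
  rcases s with _ | ⟨b0, s⟩; · simp at hs
  rcases s with _ | ⟨b1, s⟩; · simp at hs
  rcases s with _ | ⟨b2, s⟩; · simp at hs
  rcases s with _ | ⟨b3, s⟩; · simp at hs
  rcases s with _ | ⟨b4, s⟩; · simp at hs
  rcases s with _ | ⟨b5, s⟩; · simp at hs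
  rcases s with _ | ⟨b6, s⟩; · simp at hs
  rcases s with _ | ⟨b7, s⟩; · simp at hs
  rcases s with _ | ⟨b8, s⟩; · simp at hs
  rcases s with _ | ⟨b9, s⟩; · simp at hs
  rcases s with _ | ⟨b10, s⟩; · simp at hs
  rcases s with _ | ⟨b11, s⟩; · simp at hs
  rcases s with _ | ⟨b12, s⟩; · simp at hs
  rcases s with _ | ⟨b13, s⟩; · simp at hs
  rcases s with _ | ⟨b14, s⟩; · simp at hs
  simp [PySem.List.pyGetD_ofNat']

lemma interpret_eq (num : Int) : interpretA num = interpretAlt num := by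
  unfold interpretA interpretAlt
  have hs : 15 ≤ (PySem.Chars.zfill (PySem.Int.toBinChars |num|) 15).length := by
    simp [PySem.Chars.length_zfill]
  have hset : ∀ (out : List Bool) (j : Int) (b : Bool),
      (if b then PySem.List.pySetD out j true else PySem.List.pySetD out j false)
        = PySem.List.pySetD out j b := by
    intro out j b; cases b <;> rfl
  by_cases h : num < 0
  · simp only [h, decide_true, if_true]
    simp only [hset, fold_explicit]
    rw [take_rev_map _ hs]
    simp [show ¬ (0 ≤ num) by omega]
  · simp only [h, decide_false]
    simp only [hset, fold_explicit]
    rw [take_rev_map _ hs]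
    simp [show (0 ≤ num) by omega]

lemma length_interpretA (num : Int) : (interpretA num).length = 16 := by
  rw [interpret_eq]
  unfold interpretAlt
  have hs : 15 ≤ (PySem.Chars.zfill (PySem.Int.toBinChars |num|) 15).length := by
    simp [PySem.Chars.length_zfill]
  simp
  omega

lemma flat_dt (chunks : List Int) (k : Nat) (hk : k < chunks.length) :
    (((chunks.flatMap interpretA).drop (16 * k)).take 16) = interpretA (chunks.getD k 0) := by
  induction chunks generalizing k with
  | nil => simp at hk
  | cons c t ih =>
    cases k with
    | zero =>
      simp only [List.flatMap_cons, Nat.mul_zero, List.drop_zero, List.getD_cons_zero]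
      exact List.take_left' (length_interpretA c)
    | succ k =>
      have hlen : 16 * (k + 1) = (interpretA c).length + 16 * k := by
        rw [length_interpretA]; ring
      simp only [List.flatMap_cons, List.getD_cons_succ, hlen]
      rw [List.drop_append, List.drop_of_length_le (by rw [length_interpretA]; omega)]
      rw [length_interpretA]
      rw [show 16 + 16 * k - 16 = 16 * k from by omega]
      exact ih k (by simpa using hk)

lemma chunkValues_len_pos (stps : Int) (h : stps > 32767) :
    0 ≤ PySem.Int.floordiv stps 32767 := by
  rw [PySem.Int.le_floordiv_iff_mul_le (by norm_num)]
  omega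

lemma chunkValues_len_neg (stps : Int) (h : stps < -32768) :
    0 ≤ PySem.Int.floordiv stps (-32768) := by
  have : PySem.Int.floordiv stps (-32768) = PySem.Int.floordiv (-stps) 32768 := by
    rw [show stps = -(-stps) from by ring, show ((-32768 : Int)) = -(32768 : Int) from by norm_num,
        PySem.Int.floordiv_neg_neg]
    ring_nf
  rw [this, PySem.Int.le_floordiv_iff_mul_le (by norm_num)]
  omega

lemma output_loop (chunks : List Int) (n : Int) (hn : n = (chunks.length : Int)) :
    (PySem.List.pyRange 0 n 1).foldl (fun out i => out ++ interpretA (PySem.List.pyGetD chunks i 0)) []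
      = chunks.flatMap interpretA := by
  rw [hn, PySem.List.foldl_pyRange_zero_pyGetD' _ 0 (fun acc c => acc ++ interpretA c) [],
      PySem.List.foldl_append_eq_flatMap]
  simp

lemma interpretChunksA_eq (stps : Int) :
    interpretChunksA stps = ((chunkValues stps).flatMap interpretA, ((chunkValues stps).length : Int)) := by
  unfold interpretChunksA chunkValues
  by_cases h1 : stps > 32767
  · simp only [h1, if_true]
    rw [PySem.List.foldl_append_singleton_eq_map (fun _ => (32767 : Int))]
    simp only [List.nil_append, List.map_const', PySem.List.length_pyRange_one, Int.sub_zero]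
    have hq := chunkValues_len_pos stps h1
    by_cases h2 : PySem.Int.mod stps 32767 > 0
    · simp only [h2, if_true, Prod.mk.injEq]
      refine ⟨output_loop _ _ ?_, ?_⟩ <;> simp <;> omega
    · simp only [h2, if_false, List.append_nil, Prod.mk.injEq]
      refine ⟨output_loop _ _ ?_, ?_⟩ <;> simp <;> omega
  · by_cases h2 : stps < -32768
    · simp only [h1, h2, if_false, if_true]
      rw [PySem.List.foldl_append_singleton_eq_map (fun _ => (-32768 : Int))]
      simp only [List.nil_append, List.map_const', PySem.List.length_pyRange_one, Int.sub_zero]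
      have hq := chunkValues_len_neg stps h2
      by_cases h3 : PySem.Int.mod stps (-32768) < 0
      · simp only [h3, if_true, Prod.mk.injEq]
        refine ⟨output_loop _ _ ?_, ?_⟩ <;> simp <;> omega
      · simp only [h3, if_false, List.append_nil, Prod.mk.injEq]
        refine ⟨output_loop _ _ ?_, ?_⟩ <;> simp <;> omega
    · simp only [h1, h2, if_false]
      have h1' : PySem.List.pyRange 0 1 1 = [0] := by decide
      simp [h1']

lemma foldl_pair_add4 (Q : Int → List Bool) (l : List Int) (x : List Bool) (c : Int) :
    l.foldl (fun (st : List Bool × Int) i => (st.1 ++ Q i, st.2 + 4)) (x, c)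
      = (l.foldl (fun out i => out ++ Q i) x, c + 4 * l.length) := by
  induction l generalizing x c with
  | nil => simp
  | cons a t ih => simp [List.foldl_cons, ih]; ring

-- A's value, in chunk-block form
lemma A_eq (stps pulse : Int) :
    createCommands stps pulse
      = ((chunkValues stps).flatMap
           (fun c => interpretAlt c ++ (interpretAlt (-1) ++ (interpretAlt pulse ++ interpretAlt 0))),
         4 * ((chunkValues stps).length : Int)) := by
  unfold createCommands
  simp only [interpretChunksA_eq]
  have hbody : (fun (st : List Bool × Int) (i : Int) =>
      (st.1 ++ PySem.List.slice (List.flatMap interpretA (chunkValues stps)) (some (16 * i)) (some (16 * (i + 1)))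
          ++ interpretA (-1) ++ interpretA pulse ++ interpretA 0, st.2 + 4))
      = (fun (st : List Bool × Int) (i : Int) =>
      (st.1 ++ (PySem.List.slice (List.flatMap interpretA (chunkValues stps)) (some (16 * i)) (some (16 * (i + 1)))
          ++ (interpretA (-1) ++ (interpretA pulse ++ interpretA 0))), st.2 + 4)) := by
    funext st i; simp [List.append_assoc]
  rw [hbody, foldl_pair_add4]
  simp only [Prod.mk.injEq]
  constructor
  · have hcongr : ∀ i ∈ PySem.List.pyRange 0 ((chunkValues stps).length : Int) 1, ∀ acc : List Bool,
        acc ++ (PySem.List.slice ((chunkValues stps).flatMap interpretA) (some (16 * i)) (some (16 * (i + 1)))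
            ++ (interpretA (-1) ++ (interpretA pulse ++ interpretA 0)))
          = acc ++ (interpretA (PySem.List.pyGetD (chunkValues stps) i 0)
            ++ (interpretA (-1) ++ (interpretA pulse ++ interpretA 0))) := by
      intro i hi acc
      rw [PySem.List.mem_pyRange_one] at hi
      obtain ⟨ h0, hlt ⟩ := hi
      have hk : i.toNat < (chunkValues stps).length := by omega
      rw [PySem.List.slice_toNat _ (by omega) (by omega),
          show (16 * (i + 1)).toNat - (16 * i).toNat = 16 from by omega,
          show (16 * i).toNat = 16 * i.toNat from by omega,
          flat_dt (chunkValues stps) i.toNat hk,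
          show i = ((i.toNat : Nat) : Int) from by omega, PySem.List.pyGetD_natCast]
      have hmax : max i 0 = i := by omega
      simp [hmax]
    rw [PySem.List.foldl_congr_mem' _ _ _ _ hcongr,
        PySem.List.foldl_pyRange_zero_pyGetD' (chunkValues stps) 0
          (fun acc c => acc ++ (interpretA c ++ (interpretA (-1) ++ (interpretA pulse ++ interpretA 0)))) [],
        PySem.List.foldl_append_eq_flatMap]
    simp [interpret_eq]
  · simp [PySem.List.length_pyRange_one]

-- greedy decompositions of the two while loops
def posSplit (n : Int) : List Int × Int :=
  if h : n > 32767 then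
    let p := posSplit (n - 32767); (32767 :: p.1, p.2)
  else ([], n)
termination_by n.toNat
decreasing_by omega

def negSplit (n : Int) : List Int × Int :=
  if h : n < -32768 then
    let p := negSplit (n + 32768); (-32768 :: p.1, p.2)
  else ([], n)
termination_by (-n).toNat
decreasing_by omega

lemma posSplit_base (n : Int) (h : ¬ n > 32767) : posSplit n = ([], n) := by
  rw [posSplit]; simp [h]

lemma negSplit_base (n : Int) (h : ¬ n < -32768) : negSplit n = ([], n) := by
  rw [negSplit]; simp [h]

lemma goPos_eq (t : List Bool) (k : Nat) :
    ∀ (n : Int), n.toNat ≤ k → ∀ (out : List Bool) (c : Int),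
      goPos t n out c
        = ((posSplit n).2,
           out ++ (posSplit n).1.flatMap (fun v => interpretAlt v ++ t),
           c + 4 * ((posSplit n).1.length : Int)) := by
  induction k with
  | zero =>
    intro n hn out c
    have h : ¬ n > 32767 := by omega
    rw [goPos, posSplit_base n h]; simp [h]
  | succ k ih =>
    intro n hn out c
    by_cases h : n > 32767
    · rw [goPos, posSplit]
      simp only [h, dif_pos]
      rw [ih (n - 32767) (by omega)]
      simp [List.append_assoc]
      ring
    · rw [goPos, posSplit_base n h]; simp [h]

lemma goNeg_eq (t : List Bool) (k : Nat) :
    ∀ (n : Int), (-n).toNat ≤ k → ∀ (out : List Bool) (c : Int),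
      goNeg t n out c
        = ((negSplit n).2,
           out ++ (negSplit n).1.flatMap (fun v => interpretAlt v ++ t),
           c + 4 * ((negSplit n).1.length : Int)) := by
  induction k with
  | zero =>
    intro n hn out c
    have h : ¬ n < -32768 := by omega
    rw [goNeg, negSplit_base n h]; simp [h]
  | succ k ih =>
    intro n hn out c
    by_cases h : n < -32768
    · rw [goNeg, negSplit]
      simp only [h, dif_pos]
      rw [ih (n + 32768) (by omega)]
      simp [List.append_assoc]
      ring
    · rw [goNeg, negSplit_base n h]; simp [h]

-- greedy = division-based chunks, positive side
lemma posSplit_spec (k : Nat) :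
    ∀ (n : Int), n.toNat ≤ k → n > 32767 →
      (posSplit n).1 ++ [(posSplit n).2]
          = List.replicate (PySem.Int.floordiv n 32767).toNat (32767 : Int)
              ++ (if PySem.Int.mod n 32767 > 0 then [PySem.Int.mod n 32767] else [])
        ∧ 1 ≤ (posSplit n).2 ∧ (posSplit n).2 ≤ 32767 := by
  induction k with
  | zero => intro n hn h; omega
  | succ k ih =>
    intro n hn h
    have hdm := PySem.Int.floordiv_mul_add_mod n 32767
    have hm0 := PySem.Int.mod_nonneg n (b := 32767) (by norm_num)
    have hml := PySem.Int.mod_lt n (b := 32767) (by norm_num)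
    rw [posSplit]
    simp only [h, dif_pos]
    by_cases h2 : n - 32767 > 32767
    · obtain ⟨hc, hlo, hhi⟩ := ih (n - 32767) (by omega) h2
      have hdm' := PySem.Int.floordiv_mul_add_mod (n - 32767) 32767
      have hm0' := PySem.Int.mod_nonneg (n - 32767) (b := 32767) (by norm_num)
      have hml' := PySem.Int.mod_lt (n - 32767) (b := 32767) (by norm_num)
      have hq : PySem.Int.floordiv n 32767 = PySem.Int.floordiv (n - 32767) 32767 + 1 := by omega
      have hmeq : PySem.Int.mod n 32767 = PySem.Int.mod (n - 32767) 32767 := by omega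
      have hq0 : 0 ≤ PySem.Int.floordiv (n - 32767) 32767 := by nlinarith
      have hqt : (PySem.Int.floordiv (n - 32767) 32767 + 1).toNat
          = (PySem.Int.floordiv (n - 32767) 32767).toNat + 1 := by omega
      rw [hq, hmeq, hqt, List.replicate_succ]
      refine ⟨?_, hlo, hhi⟩
      simp [hc]
    · -- 32767 < n ≤ 65534
      rw [posSplit_base (n - 32767) h2]
      refine ⟨?_, by omega, by omega⟩
      by_cases hr : PySem.Int.mod n 32767 > 0
      · have hq : PySem.Int.floordiv n 32767 = 1 := by omega
        have hre : PySem.Int.mod n 32767 = n - 32767 := by omega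
        rw [hq, hre]
        simp
        omega
      · have hq : PySem.Int.floordiv n 32767 = 2 := by omega
        have hme : PySem.Int.mod n 32767 = n % 32767 := PySem.Int.mod_eq_emod_of_pos (a := n) (by norm_num)
        rw [hq, show n - 32767 = (32767:Int) from by omega]
        norm_num [show ¬ (0:Int) < n % 32767 from by omega]
        decide

-- greedy = division-based chunks, negative side
lemma negSplit_spec (k : Nat) :
    ∀ (n : Int), (-n).toNat ≤ k → n < -32768 →
      (negSplit n).1 ++ [(negSplit n).2]
          = List.replicate (PySem.Int.floordiv n (-32768)).toNat (-32768 : Int)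
              ++ (if PySem.Int.mod n (-32768) < 0 then [PySem.Int.mod n (-32768)] else [])
        ∧ -32768 ≤ (negSplit n).2 ∧ (negSplit n).2 ≤ -1 := by
  induction k with
  | zero => intro n hn h; omega
  | succ k ih =>
    intro n hn h
    have hdm := PySem.Int.floordiv_mul_add_mod n (-32768)
    have hmb := PySem.Int.mod_neg_bounds n (b := -32768) (by norm_num)
    rw [negSplit]
    simp only [h, dif_pos]
    by_cases h2 : n + 32768 < -32768
    · obtain ⟨hc, hlo, hhi⟩ := ih (n + 32768) (by omega) h2
      have hdm' := PySem.Int.floordiv_mul_add_mod (n + 32768) (-32768)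
      have hmb' := PySem.Int.mod_neg_bounds (n + 32768) (b := -32768) (by norm_num)
      have hq : PySem.Int.floordiv n (-32768) = PySem.Int.floordiv (n + 32768) (-32768) + 1 := by omega
      have hmeq : PySem.Int.mod n (-32768) = PySem.Int.mod (n + 32768) (-32768) := by omega
      have hq0 : 0 ≤ PySem.Int.floordiv (n + 32768) (-32768) := by nlinarith
      have hqt : (PySem.Int.floordiv (n + 32768) (-32768) + 1).toNat
          = (PySem.Int.floordiv (n + 32768) (-32768)).toNat + 1 := by omega
      rw [hq, hmeq, hqt, List.replicate_succ]
      refine ⟨?_, hlo, hhi⟩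
      simp [hc]
    · -- -65536 ≤ n < -32768
      rw [negSplit_base (n + 32768) h2]
      refine ⟨?_, by omega, by omega⟩
      by_cases hr : PySem.Int.mod n (-32768) < 0
      · have hq : PySem.Int.floordiv n (-32768) = 1 := by omega
        have hre : PySem.Int.mod n (-32768) = n + 32768 := by omega
        rw [hq, hre]
        simp
        omega
      · have hq : PySem.Int.floordiv n (-32768) = 2 := by omega
        rw [hq, show n + 32768 = (-32768:Int) from by omega]
        norm_num [hr]
        decide

-- B's value, in the same chunk-block form
lemma B_eq (stps pulse : Int) :
    createCommands_alt stps pulse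
      = ((chunkValues stps).flatMap
           (fun c => interpretAlt c ++ (interpretAlt (-1) ++ (interpretAlt pulse ++ interpretAlt 0))),
         4 * ((chunkValues stps).length : Int)) := by
  unfold createCommands_alt
  have ht : interpretAlt (-1) ++ interpretAlt pulse ++ interpretAlt 0
      = interpretAlt (-1) ++ (interpretAlt pulse ++ interpretAlt 0) := by
    simp [List.append_assoc]
  rw [ht]
  set t := interpretAlt (-1) ++ (interpretAlt pulse ++ interpretAlt 0) with htdef
  dsimp only
  rw [goPos_eq t stps.toNat stps le_rfl]
  by_cases h1 : stps > 32767
  · obtain ⟨hc, hlo, hhi⟩ := posSplit_spec stps.toNat stps le_rfl h1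
    rw [goNeg_eq t (-(posSplit stps).2).toNat _ le_rfl,
        negSplit_base (posSplit stps).2 (by omega)]
    have hcv : chunkValues stps = (posSplit stps).1 ++ [(posSplit stps).2] := by
      rw [hc]; unfold chunkValues; simp [h1]
    rw [hcv]
    simp [List.flatMap_append]
    ring
  · by_cases h2 : stps < -32768
    · rw [posSplit_base stps h1]
      obtain ⟨hc, hlo, hhi⟩ := negSplit_spec (-stps).toNat stps le_rfl h2
      rw [goNeg_eq t (-stps).toNat stps le_rfl]
      have hcv : chunkValues stps = (negSplit stps).1 ++ [(negSplit stps).2] := by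
        rw [hc]; unfold chunkValues; simp [h1, h2]
      rw [hcv]
      simp [List.flatMap_append]
      ring
    · rw [posSplit_base stps h1,
          goNeg_eq t (-stps).toNat stps le_rfl, negSplit_base stps h2]
      have hcv : chunkValues stps = [stps] := by unfold chunkValues; simp [h1, h2]
      rw [hcv]
      simp

-- ===== VERDICT (by name: the statement is the Claim_ definition above) =====
theorem createCommands_spec : Claim_equal_createCommands := by
  intro stps pulse _
  unfold Spec_createCommands
  rw [A_eq, B_eq]
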